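-- pv_equiv track=rewrite | github.com/casys-kaist/LLMServingSim | llm_profile/profiler/attention/batch_sampling.py | get_num_tokens_to_profile
-- ===== SOURCE A (Python) =====
-- def get_num_tokens_to_profile(
--     max_num_tokens: int,
-- ):
--     NUM_TOKENS_SPACE = (
--         list([1, 2, 4])
--         + list(range(8, 1024, 8))
--         + list(range(1024, 2 * 1024 + 1, 16))
--         + list(range(2 * 1024, 4 * 1024 + 1, 32))
--         + list(range(4 * 1024, 8 * 1024 + 1, 64))
--         + list(range(8 * 1024, 16 * 1024 + 1, 128))
--         + list(range(16 * 1024, 32 * 1024 + 1, 256))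
--         + list(range(32 * 1024, 64 * 1024 + 1, 512))
--         + list(range(64 * 1024, 128 * 1024 + 1, 1024))
--     )
--     num_tokens_to_profile = []
--     for num_tokens in NUM_TOKENS_SPACE:
--         if num_tokens <= max_num_tokens:
--             num_tokens_to_profile.append(num_tokens)
--         else:
--             break
--     num_tokens_to_profile.sort(reverse=True)
--
--     return num_tokens_to_profile
-- ===== SOURCE B (Python) =====
-- def get_num_tokens_to_profile(
--     max_num_tokens: int,
-- ):
--     NUM_TOKENS_SPACE = (
--         list([1, 2, 4])
--         + list(range(8, 1024, 8))
--         + list(range(1024, 2 * 1024 + 1, 16))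
--         + list(range(2 * 1024, 4 * 1024 + 1, 32))
--         + list(range(4 * 1024, 8 * 1024 + 1, 64))
--         + list(range(8 * 1024, 16 * 1024 + 1, 128))
--         + list(range(16 * 1024, 32 * 1024 + 1, 256))
--         + list(range(32 * 1024, 64 * 1024 + 1, 512))
--         + list(range(64 * 1024, 128 * 1024 + 1, 1024))
--     )
--     # NUM_TOKENS_SPACE is non-decreasing: binary-search the cutoff, then slice and reverse.
--     lo, hi = 0, len(NUM_TOKENS_SPACE)
--     while lo < hi:
--         mid = (lo + hi) // 2
--         if NUM_TOKENS_SPACE[mid] <= max_num_tokens: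
--             lo = mid + 1
--         else:
--             hi = mid
--     return NUM_TOKENS_SPACE[:lo][::-1]
-- ===== Notes on version B (the rewrite author's own statement) =====
-- stated objective: alternative
-- what changed: Replaces the linear scan-until-break plus a descending sort by a binary search (hand-written bisect_right) for the cutoff index over the non-decreasing constant list, returning the reversed slice; no sort and no linear scan.
import Mathlib
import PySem

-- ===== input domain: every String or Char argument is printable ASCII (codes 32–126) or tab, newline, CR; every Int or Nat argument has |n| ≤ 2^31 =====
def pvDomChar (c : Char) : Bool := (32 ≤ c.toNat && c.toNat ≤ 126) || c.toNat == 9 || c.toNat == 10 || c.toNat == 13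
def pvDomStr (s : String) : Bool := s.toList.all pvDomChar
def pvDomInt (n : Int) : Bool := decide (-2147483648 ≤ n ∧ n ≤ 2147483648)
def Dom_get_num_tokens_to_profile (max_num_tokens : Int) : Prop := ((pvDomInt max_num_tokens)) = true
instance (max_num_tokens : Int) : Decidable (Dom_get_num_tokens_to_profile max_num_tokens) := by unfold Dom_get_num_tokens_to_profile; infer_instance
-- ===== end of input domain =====

-- B replaces A's linear scan-until-break plus descending sort by a hand-written binary search
-- for the cutoff index over the non-decreasing constant list, returning the reversed slice (objective: alternative).


-- NUM_TOKENS_SPACE: the identical constant-list construction both Python versions perform.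
def pvNumTokensSpace : List Int :=
  [1, 2, 4]
    ++ PySem.List.pyRange 8 1024 8
    ++ PySem.List.pyRange 1024 (2 * 1024 + 1) 16
    ++ PySem.List.pyRange (2 * 1024) (4 * 1024 + 1) 32
    ++ PySem.List.pyRange (4 * 1024) (8 * 1024 + 1) 64
    ++ PySem.List.pyRange (8 * 1024) (16 * 1024 + 1) 128
    ++ PySem.List.pyRange (16 * 1024) (32 * 1024 + 1) 256
    ++ PySem.List.pyRange (32 * 1024) (64 * 1024 + 1) 512
    ++ PySem.List.pyRange (64 * 1024) (128 * 1024 + 1) 1024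

-- ===== PORT A =====
-- A's for-loop with append/break: keep elements while ≤ max, stop at the first larger one.
def pvLoopA (xs : List Int) (m : Int) : List Int :=
  match xs with
  | [] => []
  | x :: rest => if x ≤ m then x :: pvLoopA rest m else []

def get_num_tokens_to_profile (max_num_tokens : Int) : List Int :=
  PySem.List.sorted (pvLoopA pvNumTokensSpace max_num_tokens) (fun x => x) true

-- ===== PORT B =====
-- B's while-loop binary search (hand-written bisect_right over the constant list).
def pvBisect (xs : List Int) (m : Int) (lo hi : Nat) : Nat :=
  if _h : lo < hi then
    let mid := (lo + hi) / 2
    if xs.getD mid 0 ≤ m then pvBisect xs m (mid + 1) hi else pvBisect xs m lo mid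
  else lo
termination_by hi - lo
decreasing_by all_goals omega

def get_num_tokens_to_profile_alt (max_num_tokens : Int) : List Int :=
  (PySem.List.slice pvNumTokensSpace none
      (some ((pvBisect pvNumTokensSpace max_num_tokens 0 pvNumTokensSpace.length : Nat) : Int))).reverse

-- ===== PRECONDITION & SPEC =====
def Spec_get_num_tokens_to_profile (max_num_tokens : Int) (out : List Int) : Prop := out = get_num_tokens_to_profile_alt max_num_tokens
instance (max_num_tokens : Int) (out : List Int) : Decidable (Spec_get_num_tokens_to_profile max_num_tokens out) := by unfold Spec_get_num_tokens_to_profile; infer_instance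

-- ===== CLAIM (what is proved, stated in full; the proofs are below) =====
def Claim_equal_get_num_tokens_to_profile : Prop := ∀ (max_num_tokens : Int), Dom_get_num_tokens_to_profile max_num_tokens → Spec_get_num_tokens_to_profile max_num_tokens (get_num_tokens_to_profile max_num_tokens)

-- ===== LEMMAS AND PROOFS =====

set_option maxRecDepth 10000 in
theorem pvSpace_chain : List.IsChain (· ≤ ·) pvNumTokensSpace := by decide

theorem pvSpace_pairwise : pvNumTokensSpace.Pairwise (· ≤ ·) :=
  List.isChain_iff_pairwise.mp pvSpace_chain

-- A's loop is takeWhile (· ≤ m).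
theorem pvLoopA_eq_takeWhile (xs : List Int) (m : Int) :
    pvLoopA xs m = xs.takeWhile (fun x => decide (x ≤ m)) := by
  induction xs with
  | nil => rfl
  | cons x t ih =>
    by_cases hx : x ≤ m <;> simp [pvLoopA, hx, ih]

-- Inserting a maximal element (stable-descending order) puts it at the head, up to equal values.
theorem insertBy_max (x : Int) (ys : List Int) (h : ∀ a ∈ ys, a ≤ x) :
    PySem.List.insertBy (fun a b => decide (b < a)) x ys = x :: ys := by
  induction ys with
  | nil => rfl
  | cons y t ih =>
    have hy : y ≤ x := h y (by simp)
    by_cases hlt : y < x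
    · simp [PySem.List.insertBy, hlt]
    · have hxy : y = x := le_antisymm hy (by omega)
      have := ih (fun a ha => h a (by simp [ha]))
      simp [PySem.List.insertBy, this, hxy]

-- Stable descending sort of a non-decreasing list is its reverse.
theorem foldl_insertBy_rev (xs : List Int) :
    ∀ acc, xs.Pairwise (· ≤ ·) → (∀ a ∈ acc, ∀ b ∈ xs, a ≤ b) →
      xs.foldl (fun acc x => PySem.List.insertBy (fun a b => decide (b < a)) x acc) acc
        = xs.reverse ++ acc := by
  induction xs with
  | nil => intro acc _ _; rfl
  | cons x t ih =>
    intro acc hp hacc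
    have hins : PySem.List.insertBy (fun a b => decide (b < a)) x acc = x :: acc :=
      insertBy_max x acc (fun a ha => hacc a ha x (by simp))
    have hp' := (List.pairwise_cons.mp hp)
    have := ih (x :: acc) hp'.2 (by
      intro a ha b hb
      rcases List.mem_cons.mp ha with h1 | h1
      · exact h1 ▸ hp'.1 b hb
      · exact hacc a h1 b (by simp [hb]))
    simp only [List.foldl_cons, hins, this, List.reverse_cons, List.append_assoc,
      List.singleton_append]

theorem sorted_rev_of_pairwise (xs : List Int) (hp : xs.Pairwise (· ≤ ·)) :
    PySem.List.sorted xs (fun x => x) true = xs.reverse := by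
  rw [PySem.List.sorted_rev_eq_foldl_insertBy]
  simpa using foldl_insertBy_rev xs [] hp (by simp)

-- A prefix characterised pointwise is a take.
theorem takeWhile_eq_take (p : Int → Bool) (xs : List Int) (r : Nat) (_hr : r ≤ xs.length)
    (h1 : ∀ j (hj : j < xs.length), j < r → p xs[j])
    (h2 : ∀ j (hj : j < xs.length), r ≤ j → ¬ p xs[j]) :
    xs.takeWhile p = xs.take r := by
  induction xs generalizing r with
  | nil => simp
  | cons x t ih =>
    cases r with
    | zero =>
      have := h2 0 (by simp) (by omega)
      simp at this
      simp [this]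
    | succ r =>
      have hx := h1 0 (by simp) (by omega)
      simp at hx
      simp [hx]
      exact ih r (by simpa using _hr)
        (fun j hj hlt => h1 (j + 1) (by simpa using hj) (by omega))
        (fun j hj hle => h2 (j + 1) (by simpa using hj) (by omega))

-- The binary-search postcondition.
theorem pvBisect_spec (xs : List Int) (m : Int) (hp : xs.Pairwise (· ≤ ·)) :
    ∀ lo hi, lo ≤ hi → hi ≤ xs.length →
      (∀ j (hj : j < xs.length), j < lo → xs[j] ≤ m) →
      (∀ j (hj : j < xs.length), hi ≤ j → m < xs[j]) →
      pvBisect xs m lo hi ≤ xs.length ∧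
      (∀ j (hj : j < xs.length), j < pvBisect xs m lo hi → xs[j] ≤ m) ∧
      (∀ j (hj : j < xs.length), pvBisect xs m lo hi ≤ j → m < xs[j]) := by
  have hmono : ∀ i j (hi : i < xs.length) (hj : j < xs.length), i ≤ j → xs[i] ≤ xs[j] := by
    intro i j hi hj hij
    rcases Nat.lt_or_ge i j with h | h
    · exact (List.pairwise_iff_getElem.mp hp) i j hi hj h
    · have : i = j := by omega
      subst this; rfl
  intro lo hi
  induction lo, hi using pvBisect.induct xs m with
  | case1 lo hi h mid hle ih =>
    intro hlohi hhi hlow hhigh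
    have hmid : lo ≤ mid ∧ mid < hi := by have : mid = (lo + hi) / 2 := rfl; omega
    have hmidlen : mid < xs.length := by omega
    have hmidv : xs.getD mid 0 = xs[mid] := List.getD_eq_getElem xs 0 hmidlen
    rw [pvBisect, dif_pos h, if_pos hle]
    exact ih (by omega) hhi
      (fun j hj hjlt => le_trans (hmono j mid hj hmidlen (by omega)) (hmidv ▸ hle))
      hhigh
  | case2 lo hi h mid hgt ih =>
    intro hlohi hhi hlow hhigh
    have hmid : lo ≤ mid ∧ mid < hi := by have : mid = (lo + hi) / 2 := rfl; omega
    have hmidlen : mid < xs.length := by omega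
    have hmidv : xs.getD mid 0 = xs[mid] := List.getD_eq_getElem xs 0 hmidlen
    rw [pvBisect, dif_pos h, if_neg hgt]
    exact ih (by omega) (by omega) hlow
      (fun j hj hjge => lt_of_lt_of_le (by rw [← hmidv]; omega) (hmono mid j hmidlen hj hjge))
  | case3 lo hi h =>
    intro hlohi hhi hlow hhigh
    rw [pvBisect, dif_neg h]
    exact ⟨by omega, hlow, fun j hj hjge => hhigh j hj (by omega)⟩

-- ===== VERDICT (by name: the statement is the Claim_ definition above) =====
theorem get_num_tokens_to_profile_spec : Claim_equal_get_num_tokens_to_profile := by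
  intro m _
  unfold Spec_get_num_tokens_to_profile
  unfold get_num_tokens_to_profile get_num_tokens_to_profile_alt
  obtain ⟨hlen, h1, h2⟩ :=
    pvBisect_spec pvNumTokensSpace m pvSpace_pairwise 0 pvNumTokensSpace.length
      (by omega) (by omega) (by omega) (by omega)
  rw [pvLoopA_eq_takeWhile,
    sorted_rev_of_pairwise _ (pvSpace_pairwise.sublist (List.takeWhile_sublist _)),
    takeWhile_eq_take (fun x => decide (x ≤ m)) pvNumTokensSpace
      (pvBisect pvNumTokensSpace m 0 pvNumTokensSpace.length) hlen
      (fun j hj hjlt => by simpa using h1 j hj hjlt)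
      (fun j hj hjge => by simpa using h2 j hj hjge),
    PySem.List.slice_to_natCast]
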